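-- pv_equiv track=rewrite | github.com/flamesResource6/backend-repo_x87pvk5m_j1rmvr | main.py | _reorder_skills
-- ===== SOURCE A (Python) =====
-- from typing import List, Optional
--
-- def _tokenize(text: str) -> List[str]:
--     import re
--     tokens = re.findall(r"[a-zA-Z0-9+#./-]+", text.lower())
--     return tokens
--
-- def _reorder_skills(skills_lines: List[str], jd_kws: List[str]) -> List[str]:
--     # Split skills by commas/slashes and order by JD keyword priority
--     import re
--     skills_text = ' '.join(skills_lines)
--     parts = re.split(r",|/|\|\||;|\n", skills_text)
--     skills = [p.strip() for p in parts if p.strip()]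
--     # Stable sort by presence of JD keyword and by index position in jd_kws
--     priority = {kw: i for i, kw in enumerate(jd_kws)}
--     def score(skill: str):
--         toks = _tokenize(skill)
--         best = min([priority[t] for t in toks if t in priority], default=10_000)
--         matched = any(t in priority for t in toks)
--         return (0 if matched else 1, best)
--     skills_sorted = sorted(skills, key=score)
--     # Deduplicate while preserving order
--     seen = set()
--     ordered = []
--     for s in skills_sorted:
--         key = s.lower()
--         if key not in seen:
--             seen.add(key)
--             ordered.append(s)
--     return ordered
-- ===== SOURCE B (Python) =====
-- from typing import List
--
-- def _tokenize(text: str) -> List[str]: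
--     import re
--     tokens = re.findall(r"[a-zA-Z0-9+#./-]+", text.lower())
--     return tokens
--
-- def _reorder_skills(skills_lines: List[str], jd_kws: List[str]) -> List[str]:
--     # Bucket distribution by best JD-keyword index instead of a comparison sort.
--     import re
--     skills_text = ' '.join(skills_lines)
--     parts = re.split(r",|/|\|\||;|\n", skills_text)
--     skills = [p.strip() for p in parts if p.strip()]
--     priority = {kw: i for i, kw in enumerate(jd_kws)}
--
--     def best_of(skill):
--         best = None
--         for t in _tokenize(skill):
--             i = priority.get(t)
--             if i is not None and (best is None or i < best):
--                 best = i
--         return best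
--
--     scored = [(best_of(s), s) for s in skills]
--     matched = [(b, s) for (b, s) in scored if b is not None]
--     unmatched = [s for (b, s) in scored if b is None]
--     buckets = {}
--     for b, s in matched:
--         buckets.setdefault(b, []).append(s)
--     out = {}
--     for i in range(len(jd_kws)):
--         for s in buckets.get(i, []):
--             out.setdefault(s.lower(), s)
--     for s in unmatched:
--         out.setdefault(s.lower(), s)
--     return list(out.values())
-- ===== Notes on version B (the rewrite author's own statement) =====
-- stated objective: alternative
-- what changed: Replaces the comparison sort keyed by (matched, best-index) with a single-pass bucket distribution: each skill's best JD-priority index is computed by a running minimum over its tokens, skills are routed into per-index buckets (unmatched into a trailing list), and the output is emitted bucket-by-bucket in ascending index order with an insertion-ordered dict doing the lowercase dedup.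
import Mathlib
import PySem

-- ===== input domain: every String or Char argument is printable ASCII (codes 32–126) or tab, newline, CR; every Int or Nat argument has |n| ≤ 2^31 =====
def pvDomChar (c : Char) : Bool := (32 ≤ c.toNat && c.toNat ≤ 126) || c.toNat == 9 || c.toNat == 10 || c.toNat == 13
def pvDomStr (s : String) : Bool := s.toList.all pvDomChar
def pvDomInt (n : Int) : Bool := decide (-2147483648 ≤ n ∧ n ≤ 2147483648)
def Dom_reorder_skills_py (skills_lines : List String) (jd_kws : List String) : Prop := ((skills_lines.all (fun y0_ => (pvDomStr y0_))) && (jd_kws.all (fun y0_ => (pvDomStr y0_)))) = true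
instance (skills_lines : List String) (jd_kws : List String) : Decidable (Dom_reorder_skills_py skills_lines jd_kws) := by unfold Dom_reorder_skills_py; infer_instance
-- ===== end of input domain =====

-- B replaces A's comparison sort keyed by (matched, best JD index) with a one-pass bucket
-- distribution over best-index buckets plus a trailing unmatched list (alternative algorithm).

-- ===== shared helpers (identical Python lines in A and B: ' '.join / re.split / strip-filter / _tokenize / priority dict) =====

-- character class of the regex [a-zA-Z0-9+#./-] (hand port of re.findall; exact on the ASCII domain)
def pvTokChar (c : Char) : Bool :=
  ('a' ≤ c && c ≤ 'z') || ('A' ≤ c && c ≤ 'Z') || ('0' ≤ c && c ≤ '9') ||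
  c == '+' || c == '#' || c == '.' || c == '/' || c == '-'

-- maximal runs of pvTokChar characters, left to right = re.findall(r"[a-zA-Z0-9+#./-]+", ·)
def pvRuns : List Char → List String
  | [] => []
  | c :: cs =>
    if pvTokChar c then
      String.ofList (c :: cs.takeWhile pvTokChar) :: pvRuns (cs.dropWhile pvTokChar)
    else pvRuns cs
termination_by l => l.length
decreasing_by
  · simp only [List.length_cons]
    have h := List.length_dropWhile_le pvTokChar cs
    omega
  · simp only [List.length_cons]; omega

-- _tokenize(text) = runs of the class over text.lower()
def pvTokenize (text : String) : List String := pvRuns (PySem.Chars.lower text.toList)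

-- re.split(r",|/|\|\||;|\n", ·): split at ',', '/', ';', '\n' and at a two-character "||"
-- (leftmost scan, a lone '|' stays in the piece) — hand port, exact on the ASCII domain
def pvSplitAux : List Char → List Char → List (List Char)
  | cur, [] => [cur.reverse]
  | cur, '|' :: '|' :: cs' => cur.reverse :: pvSplitAux [] cs'
  | cur, c :: cs =>
    if c == ',' || c == '/' || c == ';' || c == '\n' then cur.reverse :: pvSplitAux [] cs
    else pvSplitAux (c :: cur) cs
termination_by _ l => l.length
decreasing_by all_goals simp only [List.length_cons]; omega

-- skills = [p.strip() for p in re.split(..., ' '.join(skills_lines)) if p.strip()]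
def pvSkills (skills_lines : List String) : List String :=
  let skills_text := PySem.Str.join " " skills_lines
  let parts := (pvSplitAux [] skills_text.toList).map String.ofList
  (parts.map (fun p => PySem.Str.strip p)).filter (fun p => p != "")

-- priority = {kw: i for i, kw in enumerate(jd_kws)}
def pvPriority (jd_kws : List String) : PySem.Dict String Int :=
  (PySem.List.enumerate jd_kws 0).foldl (fun d p => d.insert p.2 p.1) PySem.Dict.empty

-- ===== PORT A =====

-- A's score(skill): [priority[t] for t in toks if t in priority] is ported as filterMap get?
-- (value at each token that is a key, in token order — exact)
def pvScore (priority : PySem.Dict String Int) (skill : String) : Int × Int :=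
  let toks := pvTokenize skill
  let best := PySem.List.minD (toks.filterMap (fun t => priority.get? t)) (fun x => x) 10000
  let matched := toks.any (fun t => priority.contains t)
  (if matched then 0 else 1, best)

def reorder_skills_py (skills_lines : List String) (jd_kws : List String) : List String :=
  let skills := pvSkills skills_lines
  let priority := pvPriority jd_kws
  let skills_sorted := PySem.List.sorted2 skills (fun s => (pvScore priority s).1) (fun s => (pvScore priority s).2)
  (skills_sorted.foldl (fun (st : PySem.Set String × List String) s =>
      let key := PySem.Str.lower s
      if PySem.Set.contains st.1 key then st else (PySem.Set.add st.1 key, st.2 ++ [s]))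
    (PySem.Set.empty, [])).2

-- ===== PORT B =====

-- B's best_of(skill): running minimum over the tokens' priorities (None = no token matched)
def pvBestOf (priority : PySem.Dict String Int) (skill : String) : Option Int :=
  (pvTokenize skill).foldl (fun best t =>
    match priority.get? t with
    | none => best
    | some i =>
      match best with
      | none => some i
      | some m => if i < m then some i else some m) none

def reorder_skills_py_alt (skills_lines : List String) (jd_kws : List String) : List String :=
  let skills := pvSkills skills_lines
  let priority := pvPriority jd_kws
  let scored := skills.map (fun s => (pvBestOf priority s, s))
  let matched := scored.filterMap (fun p => match p.1 with | some b => some (b, p.2) | none => none)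
  let unmatched := scored.filterMap (fun p => match p.1 with | none => some p.2 | some _ => none)
  let buckets := matched.foldl (fun d p => d.modify p.1 [] (fun l => l ++ [p.2])) PySem.Dict.empty
  let out := (PySem.List.pyRange 0 (jd_kws.length : Int)).foldl
      (fun d i => (buckets.getD i []).foldl (fun d s => d.setdefault (PySem.Str.lower s) s) d)
      PySem.Dict.empty
  let out := unmatched.foldl (fun d s => d.setdefault (PySem.Str.lower s) s) out
  PySem.Dict.values out

-- ===== PRECONDITION & SPEC =====
def Spec_reorder_skills_py (skills_lines : List String) (jd_kws : List String) (out : List String) : Prop := out = reorder_skills_py_alt skills_lines jd_kws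
instance (skills_lines : List String) (jd_kws : List String) (out : List String) : Decidable (Spec_reorder_skills_py skills_lines jd_kws out) := by unfold Spec_reorder_skills_py; infer_instance

-- ===== CLAIM (what is proved, stated in full; the proofs are below) =====
def Claim_equal_reorder_skills_py : Prop := ∀ (skills_lines : List String) (jd_kws : List String), Dom_reorder_skills_py skills_lines jd_kws → Spec_reorder_skills_py skills_lines jd_kws (reorder_skills_py skills_lines jd_kws)

-- ===== LEMMAS AND PROOFS =====

-- the single integer key both programs order by: best matching index, or N if no token matches
def pvKey (priority : PySem.Dict String Int) (N : Int) (s : String) : Int :=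
  (pvBestOf priority s).getD N

-- the common canonical order: bucket v = 0, 1, …, N-1 in original order, then key N (= unmatched)
def pvCanon (priority : PySem.Dict String Int) (N : Int) (xs : List String) : List String :=
  (PySem.List.pyRange 0 (N + 1)).flatMap (fun v => xs.filter (fun s => pvKey priority N s == v))

-- ---- generic facts about insertBy (stability of A's sort) ----

theorem pv_insertBy_not_before {α : Type} (b : α → α → Bool) (x : α) (l1 l2 : List α)
    (h : ∀ y ∈ l1, b x y = false) :
    PySem.List.insertBy b x (l1 ++ l2) = l1 ++ PySem.List.insertBy b x l2 := by
  induction l1 with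
  | nil => simp
  | cons y t ih =>
    have hy : b x y = false := h y (by simp)
    simp only [List.cons_append, PySem.List.insertBy, hy]
    simp only [Bool.false_eq_true, if_false]
    rw [ih (fun z hz => h z (by simp [hz]))]

theorem pv_insertBy_all_before {α : Type} (b : α → α → Bool) (x : α) (l : List α)
    (h : ∀ y ∈ l, b x y = true) :
    PySem.List.insertBy b x l = x :: l := by
  cases l with
  | nil => rfl
  | cons y t => simp [PySem.List.insertBy, h y (by simp)]

theorem pv_insertBy_seg (K : String → Int) (x : String) (F : Int → List String)
    (hF : ∀ v y, y ∈ F v → K y = v) :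
    ∀ (n : Nat) (a b : Int), (b - a).toNat = n → a ≤ K x → K x < b →
    PySem.List.insertBy (fun p q => decide (K p < K q)) x ((PySem.List.pyRange a b).flatMap F)
      = (PySem.List.pyRange a b).flatMap (fun v => F v ++ if K x = v then [x] else []) := by
  intro n
  induction n with
  | zero => intro a b hn ha hb; omega
  | succ n ih =>
    intro a b hn ha hb
    have hab : a < b := by omega
    rw [PySem.List.pyRange_one_cons hab]
    simp only [List.flatMap_cons]
    by_cases hKa : K x = a
    · -- x belongs to bucket a: pass F a, then insert at the head of the rest
      have h1 : ∀ y ∈ F a, (fun p q => decide (K p < K q)) x y = false := by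
        intro y hy
        have := hF a y hy
        simp only [decide_eq_false_iff_not, not_lt]
        omega
      rw [pv_insertBy_not_before _ _ _ _ h1]
      have h2 : ∀ y ∈ (PySem.List.pyRange (a+1) b).flatMap F,
          (fun p q => decide (K p < K q)) x y = true := by
        intro y hy
        rcases List.mem_flatMap.mp hy with ⟨v, hv, hyv⟩
        have hva := (PySem.List.mem_pyRange_one).mp hv
        have := hF v y hyv
        simp only [decide_eq_true_eq]
        omega
      rw [pv_insertBy_all_before _ _ _ h2]
      have h3 : (PySem.List.pyRange (a+1) b).flatMap (fun v => F v ++ if K x = v then [x] else [])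
          = (PySem.List.pyRange (a+1) b).flatMap F := by
        apply List.flatMap_congr
        intro v hv
        have hva := (PySem.List.mem_pyRange_one).mp hv
        have : K x ≠ v := by omega
        simp [this]
      rw [h3, if_pos hKa]
      simp
    · -- K x > a: pass F a and recurse into the tail range
      have hax : a < K x := lt_of_le_of_ne ha (fun h => hKa h.symm)
      have h1 : ∀ y ∈ F a, (fun p q => decide (K p < K q)) x y = false := by
        intro y hy
        have := hF a y hy
        simp only [decide_eq_false_iff_not, not_lt]
        omega
      rw [pv_insertBy_not_before _ _ _ _ h1]
      rw [ih (a+1) b (by omega) (by omega) hb]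
      rw [if_neg hKa]
      simp

-- A's stable insertion sort by key K, with 0 ≤ K < N, is the bucket concatenation
theorem pv_stable_sort (K : String → Int) (N : Int) (hK : ∀ s, 0 ≤ K s ∧ K s < N)
    (xs : List String) :
    xs.foldl (fun acc x => PySem.List.insertBy (fun p q => decide (K p < K q)) x acc) []
      = (PySem.List.pyRange 0 N).flatMap (fun v => xs.filter (fun s => K s == v)) := by
  induction xs using List.reverseRecOn with
  | nil => simp
  | append_singleton xs x ih =>
    rw [List.foldl_append, List.foldl_cons, List.foldl_nil, ih]
    rw [pv_insertBy_seg K x _ (by intro v y hy; have := (List.mem_filter.mp hy).2; simpa using this)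
        (N - 0).toNat 0 N rfl (hK x).1 (hK x).2]
    apply List.flatMap_congr
    intro v _
    rw [List.filter_append]
    congr 1
    by_cases h : K x = v <;> simp [h]

-- ---- relating A's score computation to B's running minimum ----

theorem pv_foldTok (priority : PySem.Dict String Int) (toks : List String) :
    ∀ b : Option Int,
    toks.foldl (fun best t =>
      match priority.get? t with
      | none => best
      | some i =>
        match best with
        | none => some i
        | some m => if i < m then some i else some m) b
    = (toks.filterMap (fun t => priority.get? t)).foldl
        (fun best i => match best with
          | none => some i
          | some m => if i < m then some i else some m) b := by
  induction toks with
  | nil => intro b; rfl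
  | cons t ts ih =>
    intro b
    cases h : priority.get? t <;> simp [h, ih]

theorem pv_foldl_min_some (l : List Int) :
    ∀ m : Int,
    l.foldl (fun best i => match best with
      | none => some i
      | some m => if i < m then some i else some m) (some m)
    = some (l.foldl min m) := by
  induction l with
  | nil => intro m; rfl
  | cons i t ih =>
    intro m
    simp only [List.foldl_cons]
    have : (if i < m then some i else some m) = some (min m i) := by
      by_cases h : i < m
      · rw [if_pos h, min_def, if_neg (by omega)]
      · rw [if_neg h, min_def, if_pos (by omega)]
    rw [this, ih]

theorem pv_bestOf_eq_min? (priority : PySem.Dict String Int) (s : String) :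
    pvBestOf priority s
      = PySem.List.min? ((pvTokenize s).filterMap (fun t => priority.get? t)) (fun x => x) := by
  unfold pvBestOf
  rw [pv_foldTok]
  cases h : (pvTokenize s).filterMap (fun t => priority.get? t) with
  | nil => rfl
  | cons i t =>
    simp only [List.foldl_cons]
    rw [pv_foldl_min_some]
    rw [PySem.List.min?_id_cons]

theorem pv_any_isSome {α β : Type} (f : α → Option β) (l : List α) :
    (l.any fun t => (f t).isSome) = !(l.filterMap f).isEmpty := by
  induction l with
  | nil => rfl
  | cons t ts ih => cases h : f t <;> simp [h, ih]

-- ---- bounds on the priority dictionary's values ----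

theorem pv_foldIns_get? (l : List (Int × String)) :
    ∀ (d : PySem.Dict String Int) (t : String) (i : Int),
    ((l.foldl (fun d p => d.insert p.2 p.1) d).get? t = some i) →
    d.get? t = some i ∨ ∃ p ∈ l, p.1 = i := by
  induction l with
  | nil => intro d t i h; exact Or.inl h
  | cons p ps ih =>
    intro d t i h
    rcases ih _ t i h with h' | ⟨q, hq, hqi⟩
    · rw [PySem.Dict.get?_insert] at h'
      split at h'
      · right; exact ⟨p, by simp, by injection h'⟩
      · exact Or.inl h'
    · right; exact ⟨q, by simp [hq], hqi⟩

theorem pv_priority_val (jd_kws : List String) (t : String) (i : Int)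
    (h : (pvPriority jd_kws).get? t = some i) : 0 ≤ i ∧ i < (jd_kws.length : Int) := by
  unfold pvPriority at h
  rcases pv_foldIns_get? _ _ _ _ h with h' | ⟨p, hp, hpi⟩
  · simp [PySem.Dict.get?_empty] at h'
  · rcases (PySem.List.mem_enumerate_iff _ _ _).mp hp with ⟨k, hk, hpk⟩
    subst hpk
    simp at hpi
    omega

theorem pv_bestOf_bound (jd_kws : List String) (s : String) (i : Int)
    (h : pvBestOf (pvPriority jd_kws) s = some i) : 0 ≤ i ∧ i < (jd_kws.length : Int) := by
  rw [pv_bestOf_eq_min?] at h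
  have hmem := PySem.List.min?_mem h
  rcases List.mem_filterMap.mp hmem with ⟨t, _, hget⟩
  exact pv_priority_val jd_kws t i hget

-- ---- A's lexicographic comparison IS the single-key comparison ----

theorem pv_lex_eq_key (jd_kws : List String) :
    (fun a b => decide ((pvScore (pvPriority jd_kws) a).1 < (pvScore (pvPriority jd_kws) b).1) ||
      (!decide ((pvScore (pvPriority jd_kws) b).1 < (pvScore (pvPriority jd_kws) a).1) &&
        decide ((pvScore (pvPriority jd_kws) a).2 < (pvScore (pvPriority jd_kws) b).2)))
    = fun a b => decide (pvKey (pvPriority jd_kws) (jd_kws.length : Int) a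
        < pvKey (pvPriority jd_kws) (jd_kws.length : Int) b) := by
  funext a b
  set priority := pvPriority jd_kws with hprio
  set N : Int := (jd_kws.length : Int) with hN
  have hmatch : ∀ s, ((pvTokenize s).any fun t => priority.contains t)
      = (pvBestOf priority s).isSome := by
    intro s
    have h1 : (fun t => priority.contains t) = (fun t => (priority.get? t).isSome) := by
      funext t
      rw [PySem.Dict.contains_eq_isSome_get?]
    rw [h1, pv_any_isSome, pv_bestOf_eq_min?]
    cases h : PySem.List.min? ((pvTokenize s).filterMap (fun t => priority.get? t)) (fun x => x) with
    | none =>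
      have := (PySem.List.min?_eq_none_iff _ _).mp h
      simp [this]
    | some i =>
      have : (pvTokenize s).filterMap (fun t => priority.get? t) ≠ [] := by
        intro hnil
        rw [(PySem.List.min?_eq_none_iff _ _).mpr hnil] at h
        simp at h
      simp [this]
  have hscore : ∀ s, pvScore priority s =
      (if (pvBestOf priority s).isSome then 0 else 1, (pvBestOf priority s).getD 10000) := by
    intro s
    simp only [pvScore]
    rw [hmatch s]
    rw [show PySem.List.minD ((pvTokenize s).filterMap (fun t => priority.get? t)) (fun x => x) 10000
          = (pvBestOf priority s).getD 10000 from by rw [pv_bestOf_eq_min?]; rfl]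
  rw [hscore a, hscore b]
  unfold pvKey
  cases ha : pvBestOf priority a with
  | none =>
    cases hb : pvBestOf priority b with
    | none => simp
    | some j =>
      have hjb := pv_bestOf_bound jd_kws b j (by rw [← hprio]; exact hb)
      simp only [Option.isSome_none, Option.isSome_some, Option.getD_none, Option.getD_some,
        if_true, if_false, Bool.false_eq_true]
      have h1 : decide ((1:Int) < 0) = false := by decide
      have h2 : decide ((0:Int) < 1) = true := by decide
      simp only [h1, h2, Bool.false_or, Bool.not_true, Bool.false_and]
      rw [decide_eq_false]
      omega
  | some i =>
    have hia := pv_bestOf_bound jd_kws a i (by rw [← hprio]; exact ha)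
    cases hb : pvBestOf priority b with
    | none =>
      simp only [Option.isSome_none, Option.isSome_some, Option.getD_none, Option.getD_some,
        if_true, if_false, Bool.false_eq_true]
      have h1 : decide ((0:Int) < 1) = true := by decide
      simp only [h1, Bool.true_or]
      rw [decide_eq_true]
      omega
    | some j =>
      simp only [Option.isSome_some, Option.getD_some, if_true]
      have h1 : decide ((0:Int) < 0) = false := by decide
      simp only [h1, Bool.false_or, Bool.not_false, Bool.true_and]
      rfl

-- A's sorted list is the canonical bucket order
theorem pv_sorted_eq_canon (skills_lines : List String) (jd_kws : List String) :
    PySem.List.sorted2 (pvSkills skills_lines)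
      (fun s => (pvScore (pvPriority jd_kws) s).1)
      (fun s => (pvScore (pvPriority jd_kws) s).2)
    = pvCanon (pvPriority jd_kws) (jd_kws.length : Int) (pvSkills skills_lines) := by
  unfold PySem.List.sorted2 pvCanon
  simp only [if_neg (by decide : ¬(false = true))]
  rw [pv_lex_eq_key jd_kws]
  apply pv_stable_sort
  intro s
  unfold pvKey
  cases h : pvBestOf (pvPriority jd_kws) s with
  | none => simp only [Option.getD_none]; constructor <;> omega
  | some i =>
    have := pv_bestOf_bound jd_kws s i h
    simp only [Option.getD_some]
    omega

-- ---- B's buckets and unmatched list ----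

theorem pv_matched_filter (priority : PySem.Dict String Int) (skills : List String) (v : Int) :
    ((((skills.map (fun s => (pvBestOf priority s, s))).filterMap
        (fun p => match p.1 with | some b => some (b, p.2) | none => none)).filter
        (fun p => p.1 == v)).map (fun x => x.2))
    = skills.filter (fun s => pvBestOf priority s == some v) := by
  induction skills with
  | nil => rfl
  | cons s t ih =>
    cases h : pvBestOf priority s with
    | none => simpa [h] using ih
    | some b =>
      by_cases hb : b = v
      · subst hb; simpa [h] using congrArg (List.cons s) ih
      · simpa [h, hb] using ih

theorem pv_unmatched_filter (priority : PySem.Dict String Int) (skills : List String) :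
    ((skills.map (fun s => (pvBestOf priority s, s))).filterMap
        (fun p => match p.1 with | none => some p.2 | some _ => none))
    = skills.filter (fun s => (pvBestOf priority s).isNone) := by
  induction skills with
  | nil => rfl
  | cons s t ih =>
    cases h : pvBestOf priority s with
    | none => simpa [h] using congrArg (List.cons s) ih
    | some b => simpa [h] using ih

-- folding over a flatMap is the nested fold
theorem pv_foldl_flatMap {α β γ : Type} (l : List α) (g : α → List β) (f : γ → β → γ) :
    ∀ init : γ, (l.flatMap g).foldl f init = l.foldl (fun acc i => (g i).foldl f acc) init := by
  induction l with
  | nil => intro init; rfl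
  | cons a t ih => intro init; simp [List.foldl_append, ih]

-- ---- the two dedup loops agree ----

theorem pv_dedup_eq (L : List String) :
    ∀ (d : PySem.Dict String String),
    (L.foldl (fun d s => d.setdefault (PySem.Str.lower s) s) d).values
    = (L.foldl (fun (st : PySem.Set String × List String) s =>
        let key := PySem.Str.lower s
        if PySem.Set.contains st.1 key then st else (PySem.Set.add st.1 key, st.2 ++ [s]))
        (d.keys, d.values)).2 := by
  induction L with
  | nil => intro d; rfl
  | cons s t ih =>
    intro d
    simp only [List.foldl_cons]
    by_cases hc : d.contains (PySem.Str.lower s) = true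
    · rw [PySem.Dict.setdefault_of_contains d s hc]
      have hset : PySem.Set.contains d.keys (PySem.Str.lower s) = true := by
        rw [PySem.Dict.contains_eq_decide_mem_keys] at hc
        simpa [PySem.Set.contains, List.contains_iff_mem] using of_decide_eq_true hc
      simp only [hset, if_true]
      exact ih d
    · have hc' : d.contains (PySem.Str.lower s) = false := by
        cases h : d.contains (PySem.Str.lower s)
        · rfl
        · exact absurd h hc
      rw [PySem.Dict.setdefault_of_not_contains d s hc']
      have hmem : PySem.Str.lower s ∉ d.keys := by
        rw [PySem.Dict.contains_eq_decide_mem_keys] at hc'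
        exact of_decide_eq_false hc'
      have hset : PySem.Set.contains d.keys (PySem.Str.lower s) = false := by
        simp [PySem.Set.contains, hmem]
      simp only [hset, Bool.false_eq_true, if_false]
      have hkeys : (d.insert (PySem.Str.lower s) s).keys = d.keys ++ [PySem.Str.lower s] :=
        PySem.Dict.keys_insert_of_not_contains d s hc'
      have hvals : (d.insert (PySem.Str.lower s) s).values = d.values ++ [s] := by
        simp only [PySem.Dict.values]
        rw [PySem.Dict.items_insert_of_not_contains d s hc']
        simp
      have hadd : PySem.Set.add d.keys (PySem.Str.lower s) = d.keys ++ [PySem.Str.lower s] := by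
        simp [PySem.Set.add, hmem]
      rw [show ((PySem.Set.add d.keys (PySem.Str.lower s), d.values ++ [s]) :
            PySem.Set String × List String)
          = ((d.insert (PySem.Str.lower s) s).keys, (d.insert (PySem.Str.lower s) s).values) from by
        rw [hkeys, hvals, hadd]]
      exact ih (d.insert (PySem.Str.lower s) s)

-- ---- B's feed order equals the canonical order ----

theorem pv_feed_eq_canon (skills_lines : List String) (jd_kws : List String) :
    (PySem.List.pyRange 0 (jd_kws.length : Int)).flatMap
        (fun v => (pvSkills skills_lines).filter
          (fun s => pvBestOf (pvPriority jd_kws) s == some v))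
      ++ (pvSkills skills_lines).filter (fun s => (pvBestOf (pvPriority jd_kws) s).isNone)
    = pvCanon (pvPriority jd_kws) (jd_kws.length : Int) (pvSkills skills_lines) := by
  set priority := pvPriority jd_kws with hprio
  set N : Int := (jd_kws.length : Int) with hN
  unfold pvCanon
  rw [PySem.List.pyRange_one_succ_right (by positivity)]
  rw [List.flatMap_append]
  congr 1
  · apply List.flatMap_congr
    intro v hv
    have hvN := (PySem.List.mem_pyRange_one).mp hv
    apply List.filter_congr
    intro s _
    cases h : pvBestOf priority s with
    | none =>
      have : pvKey priority N s = N := by unfold pvKey; rw [h]; rfl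
      simp [this]
      omega
    | some i =>
      have : pvKey priority N s = i := by unfold pvKey; rw [h]; rfl
      simp [this]
  · simp only [List.flatMap_cons, List.flatMap_nil, List.append_nil]
    apply List.filter_congr
    intro s _
    cases h : pvBestOf priority s with
    | none =>
      have : pvKey priority N s = N := by unfold pvKey; rw [h]; rfl
      simp [this]
    | some i =>
      have hi := pv_bestOf_bound jd_kws s i (by rw [← hprio]; exact h)
      have : pvKey priority N s = i := by unfold pvKey; rw [h]; rfl
      simp [this]
      omega

-- ===== VERDICT (by name: the statement is the Claim_ definition above) =====
theorem reorder_skills_py_spec : Claim_equal_reorder_skills_py := by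
  intro skills_lines jd_kws _
  unfold Spec_reorder_skills_py reorder_skills_py reorder_skills_py_alt
  simp only []
  set priority := pvPriority jd_kws with hprio
  set N : Int := (jd_kws.length : Int) with hN
  set skills := pvSkills skills_lines with hskills
  -- A's side: sorted list is the canonical order, then the seen/ordered dedup loop
  rw [pv_sorted_eq_canon]
  -- B's side: rewrite the bucket lookups, flatten the nested folds into one fold over the feed
  have hbuck : ∀ v : Int,
      (((skills.map (fun s => (pvBestOf priority s, s))).filterMap
          (fun p => match p.1 with | some b => some (b, p.2) | none => none)).foldl
          (fun d p => d.modify p.1 [] (fun l => l ++ [p.2])) PySem.Dict.empty).getD v []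
      = skills.filter (fun s => pvBestOf priority s == some v) := by
    intro v
    rw [PySem.Dict.getD_foldl_modify_append]
    rw [PySem.Dict.getD_empty]
    rw [List.nil_append]
    exact pv_matched_filter priority skills v
  have hfeed :
      (PySem.List.pyRange 0 N).foldl
        (fun d i => ((((skills.map (fun s => (pvBestOf priority s, s))).filterMap
              (fun p => match p.1 with | some b => some (b, p.2) | none => none)).foldl
              (fun d p => d.modify p.1 [] (fun l => l ++ [p.2])) PySem.Dict.empty).getD i []).foldl
            (fun d s => d.setdefault (PySem.Str.lower s) s) d)
        PySem.Dict.empty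
      = ((PySem.List.pyRange 0 N).flatMap
            (fun v => skills.filter (fun s => pvBestOf priority s == some v))).foldl
          (fun d s => d.setdefault (PySem.Str.lower s) s) PySem.Dict.empty := by
    rw [pv_foldl_flatMap]
    apply PySem.List.foldl_congr_mem
    intro d v _
    rw [hbuck v]
  rw [hfeed, pv_unmatched_filter]
  rw [← List.foldl_append]
  rw [pv_feed_eq_canon]
  rw [pv_dedup_eq]
  rfl
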